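-- pv_equiv track=rewrite | github.com/uldissturms/exercises | kickstart/round-c-2020/second_pytest.py | solve
-- ===== SOURCE A (Python) =====
-- def solve(m):
--     r = len(m)
--     c = len(m[0])
--     ds = {}
--
--     for i in range(r - 1):
--         for j in range(c):
--             x = m[i][j]
--             y = m[i + 1][j]
--             s = ds.get(x, set())
--             if y != x:
--                 s.add(y)
--             ds[x] = s
--
--     ks = ds.keys()
--     r = []
--     s = set()
--
--     while (len(r) < len(ks)):
--         added = False
--         for k in ks:
--             if k not in s and not any(map(lambda x: x not in s, ds.get(k))):
--                 r.append(k)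
--                 s.add(k)
--                 added = True
--         if not added:
--             return ['-1']
--
--     return r
-- ===== SOURCE B (Python) =====
-- def solve(m):
--     rows = len(m)
--     c = len(m[0])
--     deps = {}
--     for i in range(rows - 1):
--         for j in range(c):
--             x = m[i][j]
--             y = m[i + 1][j]
--             s = deps.get(x, set())
--             if y != x:
--                 s.add(y)
--             deps[x] = s
--     # Kahn-style: unmet-dependency counters and reverse adjacency instead of
--     # rescanning every key's dependency set against the done-set each pass.
--     cnt = {}
--     children = {}
--     for k, dk in deps.items():
--         cnt[k] = len(dk)
--         for d in dk:
--             children.setdefault(d, []).append(k)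
--     pending = list(deps)
--     out = []
--     while pending:
--         rest = []
--         emitted = False
--         for k in pending:
--             if cnt[k] == 0:
--                 out.append(k)
--                 emitted = True
--                 for ch in children.get(k, []):
--                     cnt[ch] -= 1
--             else:
--                 rest.append(k)
--         if not emitted:
--             return ['-1']
--         pending = rest
--     return out
-- ===== Notes on version B (the rewrite author's own statement) =====
-- stated objective: alternative
-- what changed: Replaces A's repeated rescans of every key's dependency set against the done-set by Kahn-style unmet-dependency counters with a reverse-adjacency (children) map, scanning only a shrinking pending worklist each round.
-- outside the precondition, e.g. on solve([]): A raises IndexError, B raises IndexError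
import Mathlib
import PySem

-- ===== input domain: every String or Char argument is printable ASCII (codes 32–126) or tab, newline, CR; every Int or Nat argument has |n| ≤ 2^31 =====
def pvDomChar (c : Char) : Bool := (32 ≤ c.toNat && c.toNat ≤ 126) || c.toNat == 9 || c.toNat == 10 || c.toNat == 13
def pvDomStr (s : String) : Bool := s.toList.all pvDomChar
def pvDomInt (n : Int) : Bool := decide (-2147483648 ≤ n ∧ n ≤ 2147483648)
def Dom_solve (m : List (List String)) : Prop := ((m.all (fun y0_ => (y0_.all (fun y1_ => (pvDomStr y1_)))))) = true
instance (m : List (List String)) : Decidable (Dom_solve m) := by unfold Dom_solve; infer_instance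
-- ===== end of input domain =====

-- B replaces A's repeated rescans of each key's dependency set against the done-set
-- by Kahn-style unmet-dependency counters with a reverse-adjacency (children) map.

-- ===== PORT A =====
-- shared by both ports: the dependency-building loops are textually identical in Source A and Source B
def buildDs (m : List (List String)) : PySem.Dict String (PySem.Set String) :=
  (PySem.List.pyRange 0 ((m.length : Int) - 1) 1).foldl (fun ds i =>
    (PySem.List.pyRange 0 ((PySem.List.pyGetD m 0 []).length : Int) 1).foldl (fun ds j =>
      -- m[i][j] / m[i+1][j]: in range for every input admitted by Pre_solve (total form)
      let x := PySem.List.pyGetD (PySem.List.pyGetD m i []) j ""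
      let y := PySem.List.pyGetD (PySem.List.pyGetD m (i + 1) []) j ""
      let s := ds.getD x PySem.Set.empty
      let s := if y ≠ x then PySem.Set.add s y else s
      ds.insert x s) ds) PySem.Dict.empty

-- one key's turn in a pass: `if k not in s and not any(x not in s for x in ds.get(k)): …`
def stepA (ds : PySem.Dict String (PySem.Set String))
    (st : List String × PySem.Set String × Bool) (k : String) :
    List String × PySem.Set String × Bool :=
  let (r, s, added) := st
  if !(PySem.Set.contains s k)
      && !((ds.getD k PySem.Set.empty).any fun x => !(PySem.Set.contains s x)) then
    (r ++ [k], PySem.Set.add s k, true)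
  else
    (r, s, added)

theorem stepA_foldl_grows (ds : PySem.Dict String (PySem.Set String))
    (l : List String) (r : List String) (s : PySem.Set String) (a : Bool) :
    r.length ≤ (l.foldl (stepA ds) (r, s, a)).1.length ∧
      ((l.foldl (stepA ds) (r, s, a)).2.2 = true → a = true ∨
        r.length < (l.foldl (stepA ds) (r, s, a)).1.length) := by
  induction l generalizing r s a with
  | nil => simp
  | cons k t ih =>
    simp only [List.foldl_cons, stepA]
    split
    · have h := ih (r ++ [k]) (PySem.Set.add s k) true
      refine ⟨by simpa using (Nat.le_trans (by simp) h.1), fun _ => Or.inr ?_⟩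
      have := h.1; simp at this; omega
    · exact ih r s a

-- `while len(r) < len(ks): … ; if not added: return ['-1']` / final `return r`
def loopA (ds : PySem.Dict String (PySem.Set String)) (ks : List String)
    (r : List String) (s : PySem.Set String) : List String :=
  if h : r.length < ks.length then
    if hadd : (ks.foldl (stepA ds) (r, s, false)).2.2 = true then
      loopA ds ks (ks.foldl (stepA ds) (r, s, false)).1 (ks.foldl (stepA ds) (r, s, false)).2.1
    else ["-1"]
  else r
termination_by ks.length - r.length
decreasing_by
  have h2 := (stepA_foldl_grows ds ks r s false).2 hadd
  rcases h2 with h2 | h2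
  · simp at h2
  · simp only [List.foldl_attach]; omega

def solve (m : List (List String)) : List String :=
  let ds := buildDs m
  let ks := ds.keys
  loopA ds ks [] PySem.Set.empty

-- ===== PORT B =====
-- cnt[k] = len(deps[k]);  children[d] = keys whose dependency set contains d
def buildCC (ds : PySem.Dict String (PySem.Set String)) :
    PySem.Dict String Int × PySem.Dict String (List String) :=
  -- children.setdefault(d, []).append(k): insert keeps position, appends new keys
  ds.items.foldl (fun p kv =>
    (p.1.insert kv.1 (kv.2.length : Int),
     kv.2.foldl (fun ch d => ch.insert d (ch.getD d [] ++ [kv.1])) p.2))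
    (PySem.Dict.empty, PySem.Dict.empty)

-- one key's turn in a round; cnt[k] and cnt[ch] are always present (total getD/modify forms)
def stepB (children : PySem.Dict String (List String))
    (st : List String × List String × PySem.Dict String Int × Bool) (k : String) :
    List String × List String × PySem.Dict String Int × Bool :=
  let (rest, out, cnt, em) := st
  if cnt.getD k 0 == 0 then
    (rest, out ++ [k], (children.getD k []).foldl (fun c ch => c.modify ch 0 (· - 1)) cnt, true)
  else
    (rest ++ [k], out, cnt, em)

theorem stepB_foldl_shrinks (children : PySem.Dict String (List String))
    (l : List String) (rest out : List String) (cnt : PySem.Dict String Int) (em : Bool) :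
    (l.foldl (stepB children) (rest, out, cnt, em)).1.length ≤ rest.length + l.length ∧
      ((l.foldl (stepB children) (rest, out, cnt, em)).2.2.2 = true → em = true ∨
        (l.foldl (stepB children) (rest, out, cnt, em)).1.length < rest.length + l.length) := by
  induction l generalizing rest out cnt em with
  | nil => simp
  | cons k t ih =>
    simp only [List.foldl_cons, stepB]
    split
    · have h := ih rest (out ++ [k])
        ((children.getD k []).foldl (fun c ch => c.modify ch 0 (· - 1)) cnt) true
      refine ⟨by simpa using Nat.le_trans h.1 (by omega), fun _ => Or.inr ?_⟩
      have := h.1; simp at this ⊢; omega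
    · have h := ih (rest ++ [k]) out cnt em
      refine ⟨by have := h.1; simp at this ⊢; omega, fun hem => ?_⟩
      rcases h.2 hem with h2 | h2
      · exact Or.inl h2
      · exact Or.inr (by simp at h2 ⊢; omega)

-- `while pending: … ; if not emitted: return ['-1']` / final `return out`
def loopB (children : PySem.Dict String (List String)) (cnt : PySem.Dict String Int)
    (pending : List String) (out : List String) : List String :=
  if hne : pending ≠ [] then
    if hem : (pending.foldl (stepB children) ([], out, cnt, false)).2.2.2 = true then
      loopB children (pending.foldl (stepB children) ([], out, cnt, false)).2.2.1
        (pending.foldl (stepB children) ([], out, cnt, false)).1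
        (pending.foldl (stepB children) ([], out, cnt, false)).2.1
    else ["-1"]
  else out
termination_by pending.length
decreasing_by
  have h2 := (stepB_foldl_shrinks children pending [] out cnt false).2 hem
  rcases h2 with h2 | h2
  · simp at h2
  · simp only [List.foldl_attach]; simpa using h2

def solve_alt (m : List (List String)) : List String :=
  let deps := buildDs m
  let cc := buildCC deps
  loopB cc.2 cc.1 deps.keys []

-- ===== PRECONDITION & SPEC =====
-- Pre_ excludes exactly the inputs where Python A raises: m = [] (len(m[0]) IndexError)
-- and ragged rows shorter than row 0 (m[i][j] IndexError).
def Pre_solve (m : List (List String)) : Prop :=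
  m ≠ [] ∧ ∀ row ∈ m, (m.headD []).length ≤ row.length

instance (m : List (List String)) : Decidable (Pre_solve m) := by unfold Pre_solve; infer_instance

def pvWitness_solve : List (List String) := [["a", "b"], ["b", "b"]]

def Spec_solve (m : List (List String)) (out : List String) : Prop := out = solve_alt m
instance (m : List (List String)) (out : List String) : Decidable (Spec_solve m out) := by unfold Spec_solve; infer_instance

-- ===== CLAIM (what is proved, stated in full; the proofs are below) =====
def Claim_equal_solve : Prop := ∀ (m : List (List String)), Dom_solve m → Pre_solve m → Spec_solve m (solve m)

-- ===== LEMMAS AND PROOFS =====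

-- generic: a property preserved by every step holds of a foldl
theorem pvFoldlInv {α β : Type} (P : β → Prop) (l : List α) (step : β → α → β) (init : β)
    (h0 : P init) (hstep : ∀ b a, P b → P (step b a)) : P (l.foldl step init) := by
  induction l generalizing init with
  | nil => exact h0
  | cons a t ih => exact ih _ (hstep _ _ h0)

-- buildDs: keys are nodup
theorem nodup_keys_buildDs (m : List (List String)) : (buildDs m).keys.Nodup := by
  unfold buildDs
  refine pvFoldlInv (fun (d : PySem.Dict String (PySem.Set String)) => d.keys.Nodup) _ _ _ ?_ ?_
  · exact PySem.Dict.nodup_keys_empty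
  intro d i hd
  refine pvFoldlInv (fun (d : PySem.Dict String (PySem.Set String)) => d.keys.Nodup) _ _ _ hd ?_
  intro d j hd
  exact PySem.Dict.nodup_keys_insert _ _ _ hd

-- buildDs: every dependency set is nodup
theorem nodup_vals_buildDs (m : List (List String)) (a : String) :
    ((buildDs m).getD a PySem.Set.empty).Nodup := by
  refine pvFoldlInv (fun (d : PySem.Dict String (PySem.Set String)) => ∀ a, (d.getD a PySem.Set.empty).Nodup) _ _ _ ?_ ?_ a
  · intro a; simp [PySem.Dict.getD_empty, PySem.Set.empty]
  intro d i hd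
  refine pvFoldlInv (fun (d : PySem.Dict String (PySem.Set String)) => ∀ a, (d.getD a PySem.Set.empty).Nodup) _ _ _ hd ?_
  intro d j hd a
  simp only [PySem.Dict.getD_insert]
  split
  · split
    · exact PySem.Set.nodup_add _ _ (hd _)
    · exact hd _
  · exact hd _

-- the unmet-dependency count invariant, relative to A's done-set s
def cntOK (ds : PySem.Dict String (PySem.Set String)) (s : PySem.Set String)
    (cnt : PySem.Dict String Int) : Prop :=
  ∀ k ∈ ds.keys, cnt.getD k 0 =
    (((ds.getD k PySem.Set.empty).filter (fun d => !(PySem.Set.contains s d))).length : Int)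

-- the reverse-adjacency invariant
def chOK (ds : PySem.Dict String (PySem.Set String))
    (children : PySem.Dict String (List String)) : Prop :=
  ∀ d x, x ∈ ds.keys →
    ((children.getD d []).count x = if (ds.getD x PySem.Set.empty).contains d then 1 else 0)

-- projecting the two accumulators of buildCC's fold
theorem buildCC_split (ps : List (String × PySem.Set String)) :
    ∀ (c : PySem.Dict String Int) (h : PySem.Dict String (List String)),
      ps.foldl (fun p kv =>
          (p.1.insert kv.1 ((kv.2.length : Int)),
           kv.2.foldl (fun ch d => ch.insert d (ch.getD d [] ++ [kv.1])) p.2)) (c, h)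
        = (ps.foldl (fun cnt kv => cnt.insert kv.1 ((kv.2.length : Int))) c,
           ps.foldl (fun ch kv =>
             kv.2.foldl (fun ch d => ch.insert d (ch.getD d [] ++ [kv.1])) ch) h) := by
  induction ps with
  | nil => intro c h; rfl
  | cons p t ih => intro c h; simp only [List.foldl_cons]; exact ih _ _

-- an insert-per-item fold leaves absent keys untouched
theorem cntFold_getD_not_mem (ps : List (String × PySem.Set String))
    (cnt0 : PySem.Dict String Int) (k : String) (h : k ∉ ps.map Prod.fst) :
    (ps.foldl (fun cnt kv => cnt.insert kv.1 ((kv.2.length : Int))) cnt0).getD k 0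
      = cnt0.getD k 0 := by
  induction ps generalizing cnt0 with
  | nil => rfl
  | cons p t ih =>
    simp only [List.map_cons, List.mem_cons, not_or] at h
    rw [List.foldl_cons, ih _ h.2, PySem.Dict.getD_insert]
    simp [h.1]

-- an insert-per-item fold: the value stored at a key of the item list
theorem cntFold_getD (ps : List (String × PySem.Set String)) (cnt0 : PySem.Dict String Int)
    (hnd : (ps.map Prod.fst).Nodup) (k : String) (v : PySem.Set String) (hkv : (k, v) ∈ ps) :
    (ps.foldl (fun cnt kv => cnt.insert kv.1 ((kv.2.length : Int))) cnt0).getD k 0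
      = (v.length : Int) := by
  induction ps generalizing cnt0 with
  | nil => simp at hkv
  | cons p t ih =>
    simp only [List.map_cons, List.nodup_cons] at hnd
    rcases List.mem_cons.mp hkv with h | h
    · subst h
      rw [List.foldl_cons, cntFold_getD_not_mem t _ k hnd.1]
      simp
    · rw [List.foldl_cons]; exact ih _ hnd.2 h

theorem buildCC_fst (ds : PySem.Dict String (PySem.Set String)) (hnd : ds.keys.Nodup) :
    cntOK ds PySem.Set.empty (buildCC ds).1 := by
  intro k hk
  have hmap : (ds.items.map Prod.fst).Nodup := by simpa [PySem.Dict.keys] using hnd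
  have hkv : (k, ds.getD k PySem.Set.empty) ∈ ds.items := by
    have h' := hk
    simp only [PySem.Dict.keys, List.mem_map] at h'
    obtain ⟨p, hp, he⟩ := h'
    have := PySem.Dict.getD_of_mem_items ds (k := p.1) (v := p.2) (by simpa using hp) hnd
      PySem.Set.empty
    rw [← he, this]; simpa using hp
  have : (buildCC ds).1 =
      ds.items.foldl (fun cnt kv => cnt.insert kv.1 ((kv.2.length : Int))) PySem.Dict.empty := by
    unfold buildCC
    rw [buildCC_split]
  rw [this, cntFold_getD ds.items PySem.Dict.empty hmap k _ hkv]
  simp [PySem.Set.empty]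

-- appending one key along its dependency set: occurrence counts in the children lists
theorem chInner_count (dk : List String) (ch : PySem.Dict String (List String))
    (k d x : String) (hnd : dk.Nodup) :
    (((dk.foldl (fun ch d' => ch.insert d' (ch.getD d' [] ++ [k])) ch).getD d []).count x)
      = ((ch.getD d []).count x) + (if x = k ∧ d ∈ dk then 1 else 0) := by
  induction dk generalizing ch with
  | nil => simp
  | cons e t ih =>
    simp only [List.nodup_cons] at hnd
    rw [List.foldl_cons, ih _ hnd.2, PySem.Dict.getD_insert]
    by_cases hde : d = e
    · subst hde
      have hdt : d ∉ t := hnd.1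
      simp only [List.mem_cons]
      by_cases hxk : x = k
      · subst hxk; simp [hdt]
      · have hk : (k == x) = false := by
          simp only [beq_eq_false_iff_ne, ne_eq]
          exact fun h => hxk h.symm
        simp [hdt, hxk, List.count_cons, hk]
    · have hmem : (x = k ∧ d ∈ e :: t) ↔ (x = k ∧ d ∈ t) := by simp [List.mem_cons, hde]
      simp only [if_neg hde, hmem]

-- keys absent from the item list keep their children-count
theorem chFold_count_not_mem (ps : List (String × PySem.Set String))
    (ch0 : PySem.Dict String (List String)) (d x : String)
    (hx : x ∉ ps.map Prod.fst) (hvals : ∀ kv ∈ ps, kv.2.Nodup) :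
    (((ps.foldl (fun ch kv =>
        kv.2.foldl (fun ch d' => ch.insert d' (ch.getD d' [] ++ [kv.1])) ch) ch0).getD d []).count x)
      = ((ch0.getD d []).count x) := by
  induction ps generalizing ch0 with
  | nil => rfl
  | cons p t ih =>
    simp only [List.map_cons, List.mem_cons, not_or] at hx
    rw [List.foldl_cons, ih _ hx.2 (fun kv hkv => hvals kv (List.mem_cons_of_mem _ hkv)),
      chInner_count _ _ _ _ _ (hvals p (List.mem_cons_self))]
    simp [hx.1]

-- the value of the children-count over the whole item list
theorem chFold_count (ps : List (String × PySem.Set String))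
    (ch0 : PySem.Dict String (List String)) (hnd : (ps.map Prod.fst).Nodup)
    (hvals : ∀ kv ∈ ps, kv.2.Nodup) (d x : String) (v : PySem.Set String) (hxv : (x, v) ∈ ps) :
    (((ps.foldl (fun ch kv =>
        kv.2.foldl (fun ch d' => ch.insert d' (ch.getD d' [] ++ [kv.1])) ch) ch0).getD d []).count x)
      = ((ch0.getD d []).count x) + (if d ∈ v then 1 else 0) := by
  induction ps generalizing ch0 with
  | nil => simp at hxv
  | cons p t ih =>
    simp only [List.map_cons, List.nodup_cons] at hnd
    rcases List.mem_cons.mp hxv with h | h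
    · have hxt : x ∉ t.map Prod.fst := by rw [← h] at hnd; exact hnd.1
      rw [List.foldl_cons,
        chFold_count_not_mem t _ d x hxt (fun kv hkv => hvals kv (List.mem_cons_of_mem _ hkv)),
        chInner_count _ _ _ _ _ (hvals p (List.mem_cons_self))]
      rw [← h]
      simp
    · have hxp : ¬ x = p.1 := by
        intro he
        exact hnd.1 (he ▸ (List.mem_map.mpr ⟨(x, v), h, rfl⟩))
      rw [List.foldl_cons, ih _ hnd.2 (fun kv hkv => hvals kv (List.mem_cons_of_mem _ hkv)) h,
        chInner_count _ _ _ _ _ (hvals p (List.mem_cons_self))]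
      simp [hxp]

theorem buildCC_snd (ds : PySem.Dict String (PySem.Set String)) (hnd : ds.keys.Nodup)
    (hvals : ∀ a, (ds.getD a PySem.Set.empty).Nodup) :
    chOK ds (buildCC ds).2 := by
  intro d x hx
  have hmap : (ds.items.map Prod.fst).Nodup := by simpa [PySem.Dict.keys] using hnd
  have hkv : (x, ds.getD x PySem.Set.empty) ∈ ds.items := by
    have h' := hx
    simp only [PySem.Dict.keys, List.mem_map] at h'
    obtain ⟨p, hp, he⟩ := h'
    have := PySem.Dict.getD_of_mem_items ds (k := p.1) (v := p.2) (by simpa using hp) hnd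
      PySem.Set.empty
    rw [← he, this]; simpa using hp
  have hvals' : ∀ kv ∈ ds.items, kv.2.Nodup := by
    intro kv hkv'
    have : ds.getD kv.1 PySem.Set.empty = kv.2 :=
      PySem.Dict.getD_of_mem_items ds (by simpa using hkv') hnd PySem.Set.empty
    rw [← this]; exact hvals _
  have hsplit : (buildCC ds).2 =
      ds.items.foldl (fun ch kv =>
        kv.2.foldl (fun ch d' => ch.insert d' (ch.getD d' [] ++ [kv.1])) ch) PySem.Dict.empty := by
    unfold buildCC
    rw [buildCC_split]
  rw [hsplit, chFold_count ds.items PySem.Dict.empty hmap hvals' d x _ hkv]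
  simp only [PySem.Dict.getD_empty, List.count_nil, Nat.zero_add]
  by_cases hd : d ∈ ds.getD x PySem.Set.empty
  · rw [if_pos ((PySem.Set.contains_iff _ _).mpr hd), if_pos hd]
  · have hc : ¬ (ds.getD x PySem.Set.empty).contains d = true := fun hc =>
      hd ((PySem.Set.contains_iff _ _).mp hc)
    rw [if_neg hc, if_neg hd]

-- decrementing along a list subtracts the occurrence count
theorem getD_foldl_modify_sub_one (cl : List String) (cnt : PySem.Dict String Int) (x : String) :
    ((cl.foldl (fun c ch => c.modify ch 0 (· - 1)) cnt).getD x 0) = cnt.getD x 0 - cl.count x := by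
  induction cl generalizing cnt with
  | nil => simp
  | cons a t ih =>
    simp only [List.foldl_cons, ih, PySem.Dict.getD_modify, List.count_cons]
    by_cases hx : x = a
    · subst hx; simp; omega
    · simp [hx]
      exact fun h => hx h.symm

-- emitting k updates the count invariant to the enlarged done-set
theorem cnt_after_emit (ds : PySem.Dict String (PySem.Set String))
    (children : PySem.Dict String (List String)) (cnt : PySem.Dict String Int)
    (s : PySem.Set String) (k : String)
    (hch : chOK ds children) (hcnt : cntOK ds s cnt)
    (hvals : ∀ a, (ds.getD a PySem.Set.empty).Nodup)
    (hk : PySem.Set.contains s k = false) :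
    cntOK ds (s ++ [k]) ((children.getD k []).foldl (fun c ch => c.modify ch 0 (· - 1)) cnt) := by
  have hks : k ∉ s := by simpa using hk
  intro x hx
  rw [getD_foldl_modify_sub_one, hcnt x hx, hch k x hx]
  have aux : ∀ (l : List String), l.Nodup →
      ((l.filter (fun d => !(PySem.Set.contains ((s ++ [k] : List String) : PySem.Set String) d))).length
        + (if k ∈ l then 1 else 0)
        = (l.filter (fun d => !(PySem.Set.contains (s : PySem.Set String) d))).length) := by
    intro l hlnd
    induction l with
    | nil => simp
    | cons a t iht =>
      simp only [List.nodup_cons] at hlnd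
      by_cases hak : a = k
      · subst hak
        have h1 : (!(PySem.Set.contains ((s ++ [a] : List String) : PySem.Set String) a)) = false := by
          simp
        have h2 : (!(PySem.Set.contains (s : PySem.Set String) a)) = true := by simpa using hks
        rw [List.filter_cons, List.filter_cons, h1, h2]
        have hiht := iht hlnd.2
        rw [if_neg hlnd.1, Nat.add_zero] at hiht
        rw [if_pos (List.mem_cons_self), if_pos rfl, if_neg (by simp), List.length_cons]
        omega
      · have hca : (!(PySem.Set.contains ((s ++ [k] : List String) : PySem.Set String) a))
            = (!(PySem.Set.contains (s : PySem.Set String) a)) := by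
          simp [hak]
        have hmem : (k ∈ a :: t) ↔ (k ∈ t) :=
          ⟨fun h => (List.mem_cons.mp h).resolve_left (fun he => hak he.symm),
           fun h => List.mem_cons_of_mem _ h⟩
        rw [List.filter_cons, List.filter_cons, hca]
        simp only [hmem]
        cases hcs : PySem.Set.contains (s : PySem.Set String) a
        · simp only [Bool.not_false, if_true, List.length_cons]
          have := iht hlnd.2
          omega
        · simp only [Bool.not_true]
          exact iht hlnd.2
  have h := aux (ds.getD x PySem.Set.empty) (hvals x)
  by_cases hkx : k ∈ ds.getD x PySem.Set.empty
  · rw [if_pos ((PySem.Set.contains_iff _ _).mpr hkx)]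
    rw [if_pos hkx] at h
    omega
  · have : ¬ (ds.getD x PySem.Set.empty).contains k = true := fun hc =>
      hkx ((PySem.Set.contains_iff _ _).mp hc)
    rw [if_neg this]
    rw [if_neg hkx] at h
    omega

-- B's zero-count test is A's all-dependencies-done test
theorem cond_iff (ds : PySem.Dict String (PySem.Set String)) (cnt : PySem.Dict String Int)
    (s : PySem.Set String) (k : String) (hcnt : cntOK ds s cnt) (hk : k ∈ ds.keys) :
    (cnt.getD k 0 == 0) =
      !((ds.getD k PySem.Set.empty).any fun x => !(PySem.Set.contains s x)) := by
  rw [hcnt k hk]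
  cases hany : ((ds.getD k PySem.Set.empty).any fun x => !(PySem.Set.contains s x)) with
  | false =>
    have hall : (ds.getD k PySem.Set.empty).filter (fun d => !(PySem.Set.contains s d)) = [] := by
      rw [List.filter_eq_nil_iff]
      intro x hx
      have := List.any_eq_false.mp hany x hx
      simpa using this
    rw [hall]
    simp
  | true =>
    obtain ⟨x, hx, hcx⟩ := List.any_eq_true.mp hany
    have hmem : x ∈ (ds.getD k PySem.Set.empty).filter (fun d => !(PySem.Set.contains s d)) :=
      List.mem_filter.mpr ⟨hx, hcx⟩
    have hpos := List.length_pos_of_mem hmem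
    have hne : (((ds.getD k PySem.Set.empty).filter
        (fun d => !(PySem.Set.contains s d))).length : Int) ≠ 0 := by omega
    simp
    exact ⟨x, hx, by simpa using hcx⟩

-- one round of A (a full scan of ks) is simulated by one round of B (a scan of pending)
theorem round_sim (ds : PySem.Dict String (PySem.Set String))
    (children : PySem.Dict String (List String))
    (hch : chOK ds children) (hvals : ∀ a, (ds.getD a PySem.Set.empty).Nodup) :
    ∀ (l : List String) (s0 r rest : List String) (cnt : PySem.Dict String Int) (added : Bool),
      l.Nodup → (∀ k ∈ l, k ∈ ds.keys) →
      (∀ k ∈ l, PySem.Set.contains (r : PySem.Set String) k = PySem.Set.contains (s0 : PySem.Set String) k) →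
      cntOK ds r cnt → r.Nodup →
      (let A := l.foldl (stepA ds) (r, (r : PySem.Set String), added);
       let B := (l.filter (fun k => !(PySem.Set.contains (s0 : PySem.Set String) k))).foldl
                  (stepB children) (rest, r, cnt, added);
       B.2.1 = A.1 ∧ B.2.2.2 = A.2.2 ∧ A.2.1 = A.1 ∧ cntOK ds A.1 B.2.2.1 ∧
       B.1 = rest ++ l.filter (fun k => !(PySem.Set.contains (A.1 : PySem.Set String) k)) ∧
       A.1.Nodup ∧ (∃ new, A.1 = r ++ new ∧ ∀ x ∈ new, x ∈ l)) := by
  intro l s0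
  induction l with
  | nil =>
    intro r rest cnt added _ _ _ hcnt hrnd
    exact ⟨rfl, rfl, rfl, hcnt, by simp, hrnd, [], by simp, by simp⟩
  | cons k t ih =>
    intro r rest cnt added hnd hsub hfresh hcnt hrnd
    simp only [List.nodup_cons] at hnd
    have hkmem : k ∈ ds.keys := hsub k List.mem_cons_self
    by_cases hk0 : PySem.Set.contains (s0 : PySem.Set String) k = true
    · -- k is already done: A skips it, B never scans it
      have hkr : PySem.Set.contains (r : PySem.Set String) k = true :=
        (hfresh k List.mem_cons_self).trans hk0
      have hAstep : stepA ds (r, (r : PySem.Set String), added) k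
          = (r, (r : PySem.Set String), added) := by
        have hcond1 : (!(PySem.Set.contains (r : PySem.Set String) k)
            && !((ds.getD k PySem.Set.empty).any
              fun x => !(PySem.Set.contains (r : PySem.Set String) x))) = false := by
          rw [hkr]; simp
        simp only [stepA]
        rw [hcond1]
        simp
      have hBlist : (k :: t).filter (fun k => !(PySem.Set.contains (s0 : PySem.Set String) k))
          = t.filter (fun k => !(PySem.Set.contains (s0 : PySem.Set String) k)) := by
        rw [List.filter_cons, hk0]; simp
      rw [List.foldl_cons, hAstep, hBlist] at *
      obtain ⟨c1, c2, c3, c4, c5, c6, new, hnew, hnewsub⟩ :=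
        ih r rest cnt added hnd.2 (fun a ha => hsub a (List.mem_cons_of_mem _ ha))
          (fun a ha => hfresh a (List.mem_cons_of_mem _ ha)) hcnt hrnd
      refine ⟨c1, c2, c3, c4, ?_, c6, new, hnew, fun x hx => List.mem_cons_of_mem _ (hnewsub x hx)⟩
      rw [c5, List.filter_cons]
      have : k ∈ (t.foldl (stepA ds) (r, (r : PySem.Set String), added)).1 := by
        rw [hnew, List.mem_append]
        exact Or.inl ((PySem.Set.contains_iff _ _).mp hkr)
      have hck : (!(PySem.Set.contains
          (((t.foldl (stepA ds) (r, (r : PySem.Set String), added)).1 : List String) : PySem.Set String) k)) = false := by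
        simpa using this
      rw [hck]
      simp
    · -- k is pending
      have hk0' : PySem.Set.contains (s0 : PySem.Set String) k = false := by
        simpa using hk0
      have hkr : PySem.Set.contains (r : PySem.Set String) k = false :=
        (hfresh k List.mem_cons_self).trans hk0'
      have hkrm : k ∉ r := by simpa using hkr
      have hBlist : (k :: t).filter (fun k => !(PySem.Set.contains (s0 : PySem.Set String) k))
          = k :: t.filter (fun k => !(PySem.Set.contains (s0 : PySem.Set String) k)) := by
        rw [List.filter_cons, hk0']; simp
      have hcond := cond_iff ds cnt r k hcnt hkmem
      by_cases hc : (cnt.getD k 0 == 0) = true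
      · -- emitted: A appends k and marks it done, B appends k and decrements its children
        have hany : ((ds.getD k PySem.Set.empty).any
            fun x => !(PySem.Set.contains (r : PySem.Set String) x)) = false := by
          rw [hc] at hcond
          cases h' : (ds.getD k PySem.Set.empty).any
            fun x => !(PySem.Set.contains (r : PySem.Set String) x)
          · rfl
          · rw [h'] at hcond; simp at hcond
        have hAstep : stepA ds (r, (r : PySem.Set String), added) k
            = (r ++ [k], ((r ++ [k] : List String) : PySem.Set String), true) := by
          have hcond1 : (!(PySem.Set.contains (r : PySem.Set String) k)
              && !((ds.getD k PySem.Set.empty).any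
                fun x => !(PySem.Set.contains (r : PySem.Set String) x))) = true := by
            rw [hkr, hany]; simp
          simp only [stepA]
          rw [hcond1]
          simp only [if_true]
          rw [PySem.Set.add_of_not_mem hkrm]
        have hBstep : stepB children (rest, r, cnt, added) k
            = (rest, r ++ [k],
               (children.getD k []).foldl (fun c ch => c.modify ch 0 (· - 1)) cnt, true) := by
          simp only [stepB]
          rw [hc]
          simp
        have hcnt' := cnt_after_emit ds children cnt r k hch hcnt hvals hkr
        have hfresh' : ∀ a ∈ t, PySem.Set.contains ((r ++ [k] : List String) : PySem.Set String) a
            = PySem.Set.contains (s0 : PySem.Set String) a := by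
          intro a ha
          have hak : ¬ a = k := fun h => hnd.1 (h ▸ ha)
          have : PySem.Set.contains ((r ++ [k] : List String) : PySem.Set String) a
              = PySem.Set.contains (r : PySem.Set String) a := by simp [hak]
          rw [this]; exact hfresh a (List.mem_cons_of_mem _ ha)
        have hrnd' : (r ++ [k]).Nodup :=
          (List.perm_append_singleton k r).symm.nodup (List.nodup_cons.mpr ⟨hkrm, hrnd⟩)
        rw [hBlist, List.foldl_cons, List.foldl_cons, hAstep, hBstep]
        obtain ⟨c1, c2, c3, c4, c5, c6, new, hnew, hnewsub⟩ :=
          ih (r ++ [k]) rest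
            ((children.getD k []).foldl (fun c ch => c.modify ch 0 (· - 1)) cnt) true
            hnd.2 (fun a ha => hsub a (List.mem_cons_of_mem _ ha)) hfresh' hcnt' hrnd'
        refine ⟨c1, c2, c3, c4, ?_, c6, k :: new, by rw [hnew, List.append_assoc]; rfl,
          ?_⟩
        · rw [c5, List.filter_cons]
          have hkin : k ∈ (t.foldl (stepA ds) (r ++ [k], ((r ++ [k] : List String) : PySem.Set String), true)).1 := by
            rw [hnew, List.mem_append]
            exact Or.inl (by simp)
          have hck : (!(PySem.Set.contains
              (((t.foldl (stepA ds) (r ++ [k], ((r ++ [k] : List String) : PySem.Set String), true)).1 : List String) : PySem.Set String) k)) = false := by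
            simpa using hkin
          rw [hck]
          simp
        · intro x hx
          rcases List.mem_cons.mp hx with h | h
          · exact h ▸ List.mem_cons_self
          · exact List.mem_cons_of_mem _ (hnewsub x h)
      · -- not emitted: A leaves its state alone, B moves k to rest
        have hc' : (cnt.getD k 0 == 0) = false := by simpa using hc
        have hany : ((ds.getD k PySem.Set.empty).any
            fun x => !(PySem.Set.contains (r : PySem.Set String) x)) = true := by
          rw [hc'] at hcond
          cases h' : (ds.getD k PySem.Set.empty).any
            fun x => !(PySem.Set.contains (r : PySem.Set String) x)
          · rw [h'] at hcond; simp at hcond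
          · rfl
        have hAstep : stepA ds (r, (r : PySem.Set String), added) k
            = (r, (r : PySem.Set String), added) := by
          have hcond1 : (!(PySem.Set.contains (r : PySem.Set String) k)
              && !((ds.getD k PySem.Set.empty).any
                fun x => !(PySem.Set.contains (r : PySem.Set String) x))) = false := by
            rw [hany]; simp
          simp only [stepA]
          rw [hcond1]
          simp
        have hBstep : stepB children (rest, r, cnt, added) k
            = (rest ++ [k], r, cnt, added) := by
          simp only [stepB]
          rw [hc']
          simp
        rw [hBlist, List.foldl_cons, List.foldl_cons, hAstep, hBstep]
        obtain ⟨c1, c2, c3, c4, c5, c6, new, hnew, hnewsub⟩ :=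
          ih r (rest ++ [k]) cnt added hnd.2 (fun a ha => hsub a (List.mem_cons_of_mem _ ha))
            (fun a ha => hfresh a (List.mem_cons_of_mem _ ha)) hcnt hrnd
        refine ⟨c1, c2, c3, c4, ?_, c6, new, hnew,
          fun x hx => List.mem_cons_of_mem _ (hnewsub x hx)⟩
        rw [c5, List.filter_cons]
        have hknotin : k ∉ (t.foldl (stepA ds) (r, (r : PySem.Set String), added)).1 := by
          rw [hnew, List.mem_append]
          rintro (h | h)
          · exact hkrm h
          · exact hnd.1 (hnewsub k h)
        have hck : (!(PySem.Set.contains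
            (((t.foldl (stepA ds) (r, (r : PySem.Set String), added)).1 : List String) : PySem.Set String) k)) = true := by
          simpa using hknotin
        rw [hck]
        simp

-- counting: done keys plus still-pending keys make up all of ks
theorem pending_length (ks r : List String) (hksnd : ks.Nodup) (hrnd : r.Nodup)
    (hsub : ∀ x ∈ r, x ∈ ks) :
    r.length + (ks.filter (fun k => !(PySem.Set.contains (r : PySem.Set String) k))).length
      = ks.length := by
  have hperm : (ks.filter (fun k => PySem.Set.contains (r : PySem.Set String) k)).Perm r := by
    refine (List.perm_ext_iff_of_nodup (hksnd.filter _) hrnd).mpr ?_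
    intro x
    simp only [List.mem_filter]
    constructor
    · intro ⟨_, hx⟩; simpa using hx
    · intro hx; exact ⟨hsub x hx, by simpa using hx⟩
  have := List.length_eq_length_filter_add
    (fun k => PySem.Set.contains (r : PySem.Set String) k) (l := ks)
  rw [hperm.length_eq] at this
  omega

-- the two loops agree from any pair of related states
theorem loop_sim (ds : PySem.Dict String (PySem.Set String))
    (children : PySem.Dict String (List String))
    (hch : chOK ds children) (hvals : ∀ a, (ds.getD a PySem.Set.empty).Nodup)
    (hknd : ds.keys.Nodup) :
    ∀ (pending r : List String) (cnt : PySem.Dict String Int),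
      r.Nodup → (∀ x ∈ r, x ∈ ds.keys) → cntOK ds r cnt →
      pending = ds.keys.filter (fun k => !(PySem.Set.contains (r : PySem.Set String) k)) →
      loopA ds ds.keys r r = loopB children cnt pending r := by
  have main : ∀ (n : Nat) (pending r : List String) (cnt : PySem.Dict String Int),
      pending.length = n → r.Nodup → (∀ x ∈ r, x ∈ ds.keys) → cntOK ds r cnt →
      pending = ds.keys.filter (fun k => !(PySem.Set.contains (r : PySem.Set String) k)) →
      loopA ds ds.keys r r = loopB children cnt pending r := by
    intro n
    induction n using Nat.strong_induction_on with
    | _ n ihn =>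
      intro pending r cnt hlen hrnd hsub hcnt hpend
      have hplen : r.length + pending.length = ds.keys.length := by
        rw [hpend]; exact pending_length _ _ hknd hrnd hsub
      rw [loopA, loopB]
      by_cases hg : r.length < ds.keys.length
      · have hpne : pending ≠ [] := by
          intro h
          rw [h] at hplen
          simp at hplen
          omega
        rw [dif_pos hg, dif_pos hpne]
        obtain ⟨c1, c2, c3, c4, c5, c6, new, hnew, hnewsub⟩ :=
          round_sim ds children hch hvals ds.keys r r [] cnt false hknd (fun k hk => hk)
            (fun k _ => rfl) hcnt hrnd
        subst hpend
        cases hadd : (ds.keys.foldl (stepA ds) (r, (r : PySem.Set String), false)).2.2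
        · rw [dif_neg (by simp), dif_neg (by rw [c2, hadd]; simp)]
        · rw [dif_pos (by simp), dif_pos (by rw [c2, hadd])]
          rw [c3, c1, c5, List.nil_append]
          have hgrow : r.length
              < (ds.keys.foldl (stepA ds) (r, (r : PySem.Set String), false)).1.length := by
            rcases (stepA_foldl_grows ds ds.keys r (r : PySem.Set String) false).2 hadd with h | h
            · simp at h
            · exact h
          have hrnd' := c6
          have hsub' : ∀ x ∈ (ds.keys.foldl (stepA ds) (r, (r : PySem.Set String), false)).1,
              x ∈ ds.keys := by
            intro x hx
            rw [hnew] at hx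
            rcases List.mem_append.mp hx with h | h
            · exact hsub x h
            · exact hnewsub x h
          have hplen' : (ds.keys.foldl (stepA ds) (r, (r : PySem.Set String), false)).1.length
              + (ds.keys.filter (fun k => !(PySem.Set.contains
                  (((ds.keys.foldl (stepA ds) (r, (r : PySem.Set String), false)).1 : List String) : PySem.Set String) k))).length
              = ds.keys.length :=
            pending_length _ _ hknd hrnd' hsub'
          exact ihn _ (by omega) _ _ _ rfl hrnd' hsub' c4 rfl
      · have hp0 : pending = [] := by
          have : pending.length = 0 := by omega
          exact List.length_eq_zero_iff.mp this
        rw [dif_neg hg, dif_neg (by simp [hp0])]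
  intro pending r cnt hrnd hsub hcnt hpend
  exact main pending.length pending r cnt rfl hrnd hsub hcnt hpend

-- ===== VERDICT (by name: the statement is the Claim_ definition above) =====
theorem solve_spec : Claim_equal_solve := by
  intro m _ _
  unfold Spec_solve solve solve_alt
  show loopA (buildDs m) (buildDs m).keys [] PySem.Set.empty
      = loopB (buildCC (buildDs m)).2 (buildCC (buildDs m)).1 (buildDs m).keys []
  refine (loop_sim (buildDs m) (buildCC (buildDs m)).2
    (buildCC_snd _ (nodup_keys_buildDs m) (nodup_vals_buildDs m)) (nodup_vals_buildDs m) (nodup_keys_buildDs m)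
    (buildDs m).keys [] (buildCC (buildDs m)).1 (by simp) (by simp)
    (buildCC_fst _ (nodup_keys_buildDs m)) ?_)
  simp
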